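-- pv_equiv track=rewrite | github.com/didiforgithub/AEnv | benchmarks/22_ColumnStrategy/env_validator.py | _check_physics_violations
-- ===== SOURCE A (Python) =====
-- from typing import Dict, Any, List, Tuple, Optional
--
-- def _check_physics_violations(grid: List[List[int]]) -> List[str]:
--     """Check for floating pieces that violate gravity."""
--     issues = []
--
--     for col in range(len(grid[0])):
--         found_empty = False
--         for row in range(len(grid)):
--             if grid[row][col] == 0:
--                 found_empty = True
--             elif found_empty and grid[row][col] != 0:
--                 issues.append(f"PHYSICS: Floating disk at position ({row}, {col}) - violates gravity rules")
--
--     return issues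
-- ===== SOURCE B (Python) =====
-- def _check_physics_violations(grid):
--     """Check for floating pieces that violate gravity."""
--     issues = []
--     for col in range(len(grid[0])):
--         column = [row[col] for row in grid]
--         if 0 not in column:
--             continue
--         first_empty = column.index(0)
--         for row in range(first_empty + 1, len(column)):
--             if column[row] != 0:
--                 issues.append(f"PHYSICS: Floating disk at position ({row}, {col}) - violates gravity rules")
--     return issues
-- ===== Notes on version B (the rewrite author's own statement) =====
-- stated objective: alternative
-- what changed: Instead of a flag-carrying scan over every cell, B extracts each column, locates the first empty cell with index(), and reports only the non-zero cells strictly below it; all-zero-prefix columns without any empty cell are skipped outright.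
import Mathlib
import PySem

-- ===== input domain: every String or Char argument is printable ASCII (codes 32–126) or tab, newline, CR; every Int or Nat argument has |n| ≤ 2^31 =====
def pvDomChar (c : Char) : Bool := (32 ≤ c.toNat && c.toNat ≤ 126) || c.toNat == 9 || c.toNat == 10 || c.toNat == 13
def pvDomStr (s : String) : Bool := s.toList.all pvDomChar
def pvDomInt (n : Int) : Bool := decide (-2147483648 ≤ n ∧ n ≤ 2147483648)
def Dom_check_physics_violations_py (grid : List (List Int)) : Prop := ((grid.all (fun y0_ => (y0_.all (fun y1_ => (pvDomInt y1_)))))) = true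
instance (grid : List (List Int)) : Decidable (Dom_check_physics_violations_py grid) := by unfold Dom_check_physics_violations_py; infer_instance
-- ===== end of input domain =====

-- B replaces A's flag-carrying scan of every cell by a per-column first-empty-cell
-- lookup followed by a scan of the rows below it; same asymptotic cost, different
-- decomposition (objective: alternative).

-- the message f-string, identical in both Pythons
def pvMsg (row col : Int) : String :=
  "PHYSICS: Floating disk at position (" ++ PySem.Int.toStr row ++ ", " ++ PySem.Int.toStr col ++ ") - violates gravity rules"

-- ===== PORT A =====
def check_physics_violations_py (grid : List (List Int)) : List String :=
  (PySem.List.pyRange 0 ((grid.headD []).length) 1).foldl (fun issues col =>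
    ((PySem.List.pyRange 0 (grid.length) 1).foldl (fun (st : List String × Bool) row =>
        let v := PySem.List.pyGetD (PySem.List.pyGetD grid row []) col 0
        if v = 0 then (st.1, true)
        else if st.2 ∧ v ≠ 0 then (st.1 ++ [pvMsg row col], st.2)
        else st)
      (issues, false)).1) []

-- ===== PORT B =====
def check_physics_violations_py_alt (grid : List (List Int)) : List String :=
  (PySem.List.pyRange 0 ((grid.headD []).length) 1).foldl (fun issues col =>
    let column := grid.map (fun row => PySem.List.pyGetD row col 0)
    match PySem.List.index? column 0 with
    | none => issues
    | some first_empty =>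
      (PySem.List.pyRange ((first_empty : Int) + 1) (column.length) 1).foldl
        (fun acc row =>
          if PySem.List.pyGetD column row 0 ≠ 0 then acc ++ [pvMsg row col] else acc)
        issues) []

-- ===== PRECONDITION & SPEC =====
-- Pre_ excludes exactly the inputs where Python A raises IndexError: the empty grid
-- (grid[0]) and ragged grids where some row is shorter than row 0 (grid[row][col]).
def Pre_check_physics_violations_py (grid : List (List Int)) : Prop :=
  grid ≠ [] ∧ ∀ r ∈ grid, (grid.headD []).length ≤ r.length
instance (grid : List (List Int)) : Decidable (Pre_check_physics_violations_py grid) := by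
  unfold Pre_check_physics_violations_py; infer_instance

def pvWitness_check_physics_violations_py : List (List Int) := [[1, 0], [0, 1]]

def Spec_check_physics_violations_py (grid : List (List Int)) (out : List String) : Prop := out = check_physics_violations_py_alt grid
instance (grid : List (List Int)) (out : List String) : Decidable (Spec_check_physics_violations_py grid out) := by unfold Spec_check_physics_violations_py; infer_instance

-- ===== CLAIM (what is proved, stated in full; the proofs are below) =====
def Claim_equal_check_physics_violations_py : Prop := ∀ (grid : List (List Int)), Dom_check_physics_violations_py grid → Pre_check_physics_violations_py grid → Spec_check_physics_violations_py grid (check_physics_violations_py grid)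

-- ===== LEMMAS AND PROOFS =====

-- messages of the non-zero entries of a value list, indexed from i
def pvNz (c : Int) : Int → List Int → List String
  | _, [] => []
  | i, v :: vs => (if v ≠ 0 then [pvMsg i c] else []) ++ pvNz c (i + 1) vs

-- B's inner loop over range(k, len(col)) collects pvNz of the suffix from k
theorem foldB (col : List Int) (c : Int) : ∀ (n k : Nat), col.length - k = n → ∀ (acc : List String),
    (PySem.List.pyRange (k : Int) (col.length) 1).foldl
      (fun acc row => if PySem.List.pyGetD col row 0 ≠ 0 then acc ++ [pvMsg row c] else acc) acc
      = acc ++ pvNz c (k : Int) (col.drop k) := by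
  intro n
  induction n with
  | zero =>
    intro k hk acc
    have hle : col.length ≤ k := by omega
    rw [PySem.List.pyRange_one_eq_nil (by exact_mod_cast hle), List.drop_eq_nil_of_le hle]
    simp [pvNz]
  | succ n ih =>
    intro k hk acc
    have hlt : k < col.length := by omega
    rw [PySem.List.pyRange_one_cons (by exact_mod_cast hlt)]
    rw [List.drop_eq_getElem_cons hlt]
    simp only [List.foldl_cons]
    rw [show PySem.List.pyGetD col (k : Int) 0 = col[k] from by
      rw [PySem.List.pyGetD_natCast]; exact List.getD_eq_getElem _ _ hlt]
    have := ih (k + 1) (by omega) (if col[k] ≠ 0 then acc ++ [pvMsg (k : Int) c] else acc)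
    push_cast at this ⊢
    rw [this]
    by_cases h : col[k] = 0 <;> simp [h, pvNz]

-- A's inner flag-carrying scan, characterised on the suffix from k: once the flag is
-- set it collects pvNz; before it is set, it collects pvNz below the first zero.
theorem foldA (col : List Int) (c : Int) : ∀ (n k : Nat), col.length - k = n → ∀ (acc : List String) (flag : Bool),
    ((PySem.List.pyRange (k : Int) (col.length) 1).foldl (fun (st : List String × Bool) row =>
        let v := PySem.List.pyGetD col row 0
        if v = 0 then (st.1, true)
        else if st.2 ∧ v ≠ 0 then (st.1 ++ [pvMsg row c], st.2)
        else st) (acc, flag)).1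
      = acc ++ (if flag then pvNz c (k : Int) (col.drop k)
                else match PySem.List.index? (col.drop k) 0 with
                     | none => []
                     | some f => pvNz c ((k : Int) + f + 1) (col.drop (k + f + 1))) := by
  intro n
  induction n with
  | zero =>
    intro k hk acc flag
    have hle : col.length ≤ k := by omega
    rw [PySem.List.pyRange_one_eq_nil (by exact_mod_cast hle), List.drop_eq_nil_of_le hle]
    cases flag <;> simp [pvNz, PySem.List.index?]
  | succ n ih =>
    intro k hk acc flag
    have hlt : k < col.length := by omega
    rw [PySem.List.pyRange_one_cons (by exact_mod_cast hlt)]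
    rw [List.drop_eq_getElem_cons hlt]
    simp only [List.foldl_cons]
    rw [show PySem.List.pyGetD col (k : Int) 0 = col[k] from by
      rw [PySem.List.pyGetD_natCast]; exact List.getD_eq_getElem _ _ hlt]
    by_cases h : col[k] = 0
    · -- flag becomes true
      simp only [h, if_pos]
      have := ih (k + 1) (by omega) acc true
      push_cast at this ⊢
      rw [show pvNz c (↑k + 1) (List.drop (k + 1) col) = pvNz c (↑k) (col[k] :: List.drop (k+1) col) from by simp [pvNz, h]] at this
      cases flag
      · rw [PySem.List.index?_cons_self]
        simpa [pvNz, h] using this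
      · simpa [pvNz, h] using this
    · simp only [if_neg h]
      cases flag
      · -- flag false: state unchanged
        simp only [Bool.false_eq_true, false_and, if_false]
        have := ih (k + 1) (by omega) acc false
        push_cast at this ⊢
        rw [this]
        rw [PySem.List.index?_cons_of_ne _ h]
        cases hidx : PySem.List.index? (List.drop (k + 1) col) 0 with
        | none => simp
        | some f =>
          simp only [Option.map_some]
          have h1 : k + 1 + f + 1 = k + (f + 1) + 1 := by omega
          rw [h1]
          push_cast
          ring_nf
      · -- flag true: append message
        rw [if_pos (show true = true ∧ col[k] ≠ 0 from ⟨rfl, h⟩), if_pos rfl]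
        have := ih (k + 1) (by omega) (acc ++ [pvMsg (k : Int) c]) true
        push_cast at this ⊢
        rw [this]
        simp [pvNz, h]

-- per-column step: A's flag scan of column col equals B's first-empty-then-below scan
theorem colStep (grid : List (List Int)) (c : Int) (issues : List String) :
    ((PySem.List.pyRange 0 (grid.length) 1).foldl (fun (st : List String × Bool) row =>
        let v := PySem.List.pyGetD (PySem.List.pyGetD grid row []) c 0
        if v = 0 then (st.1, true)
        else if st.2 ∧ v ≠ 0 then (st.1 ++ [pvMsg row c], st.2)
        else st) (issues, false)).1
    = (let column := grid.map (fun row => PySem.List.pyGetD row c 0)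
       match PySem.List.index? column 0 with
       | none => issues
       | some first_empty =>
         (PySem.List.pyRange ((first_empty : Int) + 1) (column.length) 1).foldl
           (fun acc row => if PySem.List.pyGetD column row 0 ≠ 0 then acc ++ [pvMsg row c] else acc) issues) := by
  have hlen : (grid.map (fun row => PySem.List.pyGetD row c 0)).length = grid.length := by simp
  have hfun : (PySem.List.pyRange 0 (grid.length) 1).foldl (fun (st : List String × Bool) row =>
        let v := PySem.List.pyGetD (PySem.List.pyGetD grid row []) c 0
        if v = 0 then (st.1, true)
        else if st.2 ∧ v ≠ 0 then (st.1 ++ [pvMsg row c], st.2)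
        else st) (issues, false)
      = (PySem.List.pyRange 0 ((grid.map (fun row => PySem.List.pyGetD row c 0)).length) 1).foldl
        (fun (st : List String × Bool) row =>
        let v := PySem.List.pyGetD (grid.map (fun row => PySem.List.pyGetD row c 0)) row 0
        if v = 0 then (st.1, true)
        else if st.2 ∧ v ≠ 0 then (st.1 ++ [pvMsg row c], st.2)
        else st) (issues, false) := by
    rw [hlen]
    apply PySem.List.foldl_congr_mem
    intro st row hrow
    have hb := PySem.List.mem_pyRange_one.mp hrow
    have h1 : row < ((grid.map (fun row => PySem.List.pyGetD row c 0)).length : Int) := by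
      rw [hlen]; exact_mod_cast hb.2
    rw [PySem.List.pyGetD_eq_getElem _ [] hb.1 (by exact_mod_cast hb.2),
        PySem.List.pyGetD_eq_getElem _ 0 hb.1 h1, List.getElem_map]
  rw [hfun]
  have hA := foldA (grid.map (fun row => PySem.List.pyGetD row c 0)) c
      ((grid.map (fun row => PySem.List.pyGetD row c 0)).length) 0 (by omega) issues false
  simp only [Nat.cast_zero, List.drop_zero] at hA
  rw [hA]
  simp only []
  cases hidx : PySem.List.index? (grid.map (fun row => PySem.List.pyGetD row c 0)) 0 with
  | none => simp
  | some f =>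
    have hB := foldB (grid.map (fun row => PySem.List.pyGetD row c 0)) c
        ((grid.map (fun row => PySem.List.pyGetD row c 0)).length - (f + 1)) (f + 1) rfl issues
    push_cast at hB ⊢
    rw [hB]
    norm_num

-- ===== VERDICT (by name: the statement is the Claim_ definition above) =====
theorem check_physics_violations_py_spec : Claim_equal_check_physics_violations_py := by
  intro grid _ _
  unfold Spec_check_physics_violations_py check_physics_violations_py check_physics_violations_py_alt
  apply PySem.List.foldl_congr_mem
  intro issues c _
  exact colStep grid c issues
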